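-- pv_equiv track=rewrite | github.com/Team-AiK/TT-Thinking-Training | Week18/groovypark/3_solution.py | solution
-- ===== SOURCE A (Python) =====
-- import collections
--
-- def solution(B):
--     position = {
--         "x": 0,
--         "y": 0,
--         "l": 0
--     }
--
--     if not B or not B[0]:
--         return 0
--
--     up_left = (-1, -1)
--     up_right = (-1, 1)
--
--     for y in range(len(B)):
--         for x in range(len(B[y])):
--             if B[y][x] == "O":
--                 position["x"], position["y"] = x, y
--                 break
--
--     q = collections.deque()
--     q.append(position)
--
--     ans = 0
--     while q:
--         cur = q.popleft()
--         ans = max(ans, cur["l"])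
--         for dy, dx in [up_left, up_right]:
--             ny, nx = cur["y"]+dy, cur["x"]+dx
--             if ny < 0 or nx < 0 or ny >= len(B) or nx >= len(B[0]):
--                 continue
--             if B[ny][nx] != "X":
--                 continue
--             oy, ox = ny + dy, nx + dx
--             if oy < 0 or ox < 0 or oy >= len(B) or ox >= len(B[0]):
--                 continue
--             if B[oy][ox] == "X":
--                 continue
--             q.append({
--                 "x": ox,
--                 "y": oy,
--                 "l": cur["l"]+1
--             })
--
--     return ans
-- ===== SOURCE B (Python) =====
-- def solution(B):
--     if not B:
--         return 0
--     w = len(B[0])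
--     sy = sx = 0
--     for y, row in enumerate(B):
--         i = row.find("O")
--         if i != -1:
--             sy, sx = y, i
--
--     def step(y, x, fym2):
--         best = 0
--         for dx in (-1, 1):
--             nx, ox = x + dx, x + 2 * dx
--             if y >= 1 and 0 <= nx < w and B[y - 1][nx] == "X" \
--                and y >= 2 and 0 <= ox < w and B[y - 2][ox] != "X":
--                 best = max(best, 1 + fym2[ox])
--         return best
--
--     row2 = row1 = []
--     for y in range(sy):
--         cur = [step(y, x, row2) for x in range(w)]
--         row2, row1 = row1, cur
--     return step(sy, sx, row2)
-- ===== Notes on version B (the rewrite author's own statement) =====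
-- stated objective: faster
-- what changed: Replaces A's breadth-first queue that re-expands every jump path (exponential on branching X-ladders) with a bottom-up dynamic program: a rolling two-row table of the longest chain per cell, filled once, then read at the start cell.
-- outside the precondition, e.g. on solution(['ZZ', 'Z', '!O']): A returns 0, B returns 0; on solution(['...', 'X', '...', '..O']): A returns 0, B raises IndexError
import Mathlib
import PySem

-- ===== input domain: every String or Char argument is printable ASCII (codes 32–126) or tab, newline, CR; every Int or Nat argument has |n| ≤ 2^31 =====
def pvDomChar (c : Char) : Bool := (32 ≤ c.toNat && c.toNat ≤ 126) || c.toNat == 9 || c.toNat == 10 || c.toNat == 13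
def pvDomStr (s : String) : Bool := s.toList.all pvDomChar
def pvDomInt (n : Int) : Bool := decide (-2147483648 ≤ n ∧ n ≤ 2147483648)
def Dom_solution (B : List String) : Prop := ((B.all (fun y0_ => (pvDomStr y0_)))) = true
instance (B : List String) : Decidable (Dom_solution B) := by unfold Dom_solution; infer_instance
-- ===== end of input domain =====

-- B replaces A's exponential breadth-first re-exploration by a rolling dynamic-programming
-- table over the rows (longest jump chain per cell), computed once bottom-up.

-- ===== PORT A =====
-- B[y][x] as an Option (none = IndexError)
def cell (B : List String) (y x : Int) : Option Char :=
  match PySem.List.pyGet? B y with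
  | none => none
  | some r => PySem.Str.pyGet? r x

-- inner O-scan: 'for x in range(len(B[y])): if B[y][x] == "O": …; break'
def scanRowA (cs : List Char) (x : Nat) (y : Int) (pos : Int × Int) : Int × Int :=
  match cs with
  | [] => pos
  | c :: rest => if c = 'O' then ((x : Int), y) else scanRowA rest (x + 1) y pos

-- outer O-scan over the rows (later rows overwrite)
def scanA (rows : List String) (y : Int) (pos : Int × Int) : Int × Int :=
  match rows with
  | [] => pos
  | r :: rest => scanA rest (y + 1) (scanRowA r.toList 0 y pos)

-- the body of A's 'for dy, dx in [up_left, up_right]': the enqueued cell, if any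
def childA (B : List String) (h w x y l dy dx : Int) : Option (Int × Int × Int) :=
  let ny := y + dy
  let nx := x + dx
  if ny < 0 ∨ nx < 0 ∨ h ≤ ny ∨ w ≤ nx then none
  else if cell B ny nx ≠ some 'X' then none
  else
    let oy := ny + dy
    let ox := nx + dx
    if oy < 0 ∨ ox < 0 ∨ h ≤ oy ∨ w ≤ ox then none
    else if cell B oy ox = some 'X' then none
    else some (ox, oy, l + 1)

lemma childA_some_y {B : List String} {h w x y l dx : Int} {c : Int × Int × Int}
    (hc : childA B h w x y l (-1) dx = some c) : c.2.1 = y - 2 ∧ 2 ≤ y := by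
  unfold childA at hc
  dsimp only at hc
  split_ifs at hc with h1 h2 h3 h4
  cases hc
  push_neg at h3
  exact ⟨by show y + -1 + -1 = y - 2; omega, by omega⟩

lemma children_measure_lt (B : List String) (h w x y l : Int) :
    (([((-1 : Int), (-1 : Int)), ((-1 : Int), (1 : Int))].filterMap
        (fun d => childA B h w x y l d.1 d.2)).map
      (fun c : Int × Int × Int => 2 ^ c.2.1.toNat)).sum < 2 ^ y.toNat := by
  rcases h1 : childA B h w x y l (-1) (-1) with _ | c1 <;>
    rcases h2 : childA B h w x y l (-1) 1 with _ | c2 <;>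
      simp only [List.filterMap, h1, h2, List.map_cons, List.map_nil, List.sum_cons,
        List.sum_nil]
  · positivity
  · obtain ⟨e2, hy⟩ := childA_some_y h2
    rw [e2]
    have : (y - 2).toNat < y.toNat := by omega
    calc 2 ^ (y - 2).toNat + 0 = 2 ^ (y - 2).toNat := by omega
      _ < 2 ^ y.toNat := Nat.pow_lt_pow_right (by norm_num) this
  · obtain ⟨e1, hy⟩ := childA_some_y h1
    rw [e1]
    have : (y - 2).toNat < y.toNat := by omega
    calc 2 ^ (y - 2).toNat + 0 = 2 ^ (y - 2).toNat := by omega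
      _ < 2 ^ y.toNat := Nat.pow_lt_pow_right (by norm_num) this
  · obtain ⟨e1, hy⟩ := childA_some_y h1
    obtain ⟨e2, _⟩ := childA_some_y h2
    rw [e1, e2]
    have h1' : (y - 2).toNat + 1 < y.toNat := by omega
    calc 2 ^ (y - 2).toNat + (2 ^ (y - 2).toNat + 0) = 2 ^ ((y - 2).toNat + 1) := by
          rw [pow_succ]; omega
      _ < 2 ^ y.toNat := Nat.pow_lt_pow_right (by norm_num) h1'

-- A's BFS loop over the deque
def bfsA (B : List String) (h w : Int) (q : List (Int × Int × Int)) (ans : Int) : Int :=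
  match q with
  | [] => ans
  | (x, y, l) :: rest =>
      bfsA B h w
        (rest ++ ([((-1 : Int), (-1 : Int)), ((-1 : Int), (1 : Int))].filterMap
          (fun d => childA B h w x y l d.1 d.2)))
        (max ans l)
termination_by (q.map (fun c => 2 ^ c.2.1.toNat)).sum
decreasing_by
  simp only [List.map_append, List.sum_append, List.map_cons, List.sum_cons]
  have := children_measure_lt B h w x y l
  omega

def solution (B : List String) : Int :=
  if B = [] ∨ (B.headD "") = "" then 0
  else
    let pos := scanA B 0 (0, 0)
    bfsA B (B.length : Int) ((B.headD "").toList.length : Int) [(pos.1, pos.2, (0 : Int))] 0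

-- ===== PORT B =====
-- the (shared) jump condition of Source B's 'step', written once
def condB (B : List String) (w y x dx : Int) : Bool :=
  decide (1 ≤ y) && decide (0 ≤ x + dx) && decide (x + dx < w)
    && (cell B (y - 1) (x + dx) == some 'X')
    && decide (2 ≤ y) && decide (0 ≤ x + 2 * dx) && decide (x + 2 * dx < w)
    && !(cell B (y - 2) (x + 2 * dx) == some 'X')

-- Source B's 'step'; fym2[ox] is guarded by 0 ≤ ox < w = len fym2 in every use
def stepB (B : List String) (w y x : Int) (fym2 : List Int) : Int :=
  [(-1 : Int), 1].foldl (fun best dx =>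
    if condB B w y x dx then max best (1 + (PySem.List.pyGet? fym2 (x + 2 * dx)).getD 0)
    else best) 0

-- Source B's start scan: last row containing "O", first index in it
def scanB (B : List String) : Int × Int :=
  (PySem.List.enumerate B 0).foldl (fun s p =>
    let i := PySem.Str.find p.2 "O"
    if i ≠ -1 then (p.1, i) else s) (0, 0)

-- the rolling two-row DP fill ('row2 = row1 = []' stands for Python's unread initial rows)
def fillB (B : List String) (w sy : Int) : List Int :=
  ((PySem.List.pyRange 0 sy 1).foldl
    (fun (st : List Int × List Int) y =>
      (st.2, (PySem.List.pyRange 0 w 1).map (fun x => stepB B w y x st.1)))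
    ([], [])).1

def solution_alt (B : List String) : Int :=
  if B = [] then 0
  else
    let w := ((B.headD "").toList.length : Int)
    let s := scanB B
    stepB B w s.1 s.2 (fillB B w s.1)

-- ===== PRECONDITION & SPEC =====
-- Pre_ excludes boards on which the Python can hit an IndexError: a probed row (one lying
-- below some row that contains 'O') shorter than the first row; on a few such ragged boards
-- A still happens to return (its probes miss the short row) — see the cites.
def Pre_solution (B : List String) : Prop :=
  ∀ j, j < B.length → ∀ i, i < j → 'O' ∈ (B.getD j "").toList →
    (B.headD "").toList.length ≤ (B.getD i "").toList.length
instance (B : List String) : Decidable (Pre_solution B) := by unfold Pre_solution; infer_instance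
def pvWitness_solution : List String := ["X", "O"]

def Spec_solution (B : List String) (out : Int) : Prop := out = solution_alt B
instance (B : List String) (out : Int) : Decidable (Spec_solution B out) := by unfold Spec_solution; infer_instance

-- ===== CLAIM (what is proved, stated in full; the proofs are below) =====
def Claim_equal_solution : Prop := ∀ (B : List String), Dom_solution B → Pre_solution B → Spec_solution B (solution B)

-- ===== LEMMAS AND PROOFS =====
-- the longest-chain value both programs compute, per cell
def chain (B : List String) (w : Int) (y x : Int) : Int :=
  max (max 0 (if h : condB B w y x (-1) then 1 + chain B w (y - 2) (x + 2 * (-1)) else 0))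
      (if h : condB B w y x 1 then 1 + chain B w (y - 2) (x + 2 * 1) else 0)
termination_by y.toNat
decreasing_by
  all_goals
    simp only [condB, Bool.and_eq_true, decide_eq_true_eq] at h
    omega

lemma chain_nonneg (B : List String) (w y x : Int) : 0 ≤ chain B w y x := by
  rw [chain]
  exact le_trans (le_max_left 0 _) (le_max_left _ _)

lemma stepB_eq_chain (B : List String) (w y x : Int) (fym2 : List Int)
    (Hf : 2 ≤ y → ∀ ox : Int, 0 ≤ ox → ox < w →
      (PySem.List.pyGet? fym2 ox).getD 0 = chain B w (y - 2) ox) :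
    stepB B w y x fym2 = chain B w y x := by
  rw [chain]
  simp only [stepB, List.foldl]
  by_cases h1 : condB B w y x (-1) = true <;> by_cases h2 : condB B w y x 1 = true
  · have hb1 := h1; have hb2 := h2
    simp only [condB, Bool.and_eq_true, decide_eq_true_eq] at hb1 hb2
    rw [if_pos h1, if_pos h2, dif_pos h1, dif_pos h2,
        Hf (by omega) (x + 2 * (-1)) (by omega) (by omega),
        Hf (by omega) (x + 2 * 1) (by omega) (by omega)]
  · have hb1 := h1
    simp only [condB, Bool.and_eq_true, decide_eq_true_eq] at hb1
    rw [if_pos h1, if_neg h2, dif_pos h1, dif_neg h2,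
        Hf (by omega) (x + 2 * (-1)) (by omega) (by omega)]
    omega
  · have hb2 := h2
    simp only [condB, Bool.and_eq_true, decide_eq_true_eq] at hb2
    rw [if_neg h1, if_pos h2, dif_neg h1, dif_pos h2,
        Hf (by omega) (x + 2 * 1) (by omega) (by omega)]
    omega
  · rw [if_neg h1, if_neg h2, dif_neg h1, dif_neg h2]
    omega

-- the DP row of chain-values
def rowTab (B : List String) (w j : Int) : List Int :=
  (PySem.List.pyRange 0 w 1).map (fun x => chain B w j x)

lemma rowTab_get (B : List String) (w j ox : Int) (h0 : 0 ≤ ox) (h1 : ox < w) :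
    (PySem.List.pyGet? (rowTab B w j) ox).getD 0 = chain B w j ox := by
  have he : (PySem.List.pyGet? (rowTab B w j) ox).getD 0 = PySem.List.pyGetD (rowTab B w j) ox 0 := by
    simp [PySem.List.pyGetD]
  rw [he, rowTab, PySem.List.pyGetD_map_pyRange_of_nonneg _ _ _ _ h0 h1]

lemma fill_spec (B : List String) (w : Int) (k : Nat) (x : Int) :
    stepB B w (k : Int) x (fillB B w (k : Int)) = chain B w (k : Int) x := by
  have H : ∀ k : Nat,
      (2 ≤ k → ((PySem.List.pyRange 0 (k : Int) 1).foldl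
          (fun (st : List Int × List Int) y =>
            (st.2, (PySem.List.pyRange 0 w 1).map (fun x => stepB B w y x st.1)))
          ([], [])).1 = rowTab B w ((k : Int) - 2)) ∧
      (1 ≤ k → ((PySem.List.pyRange 0 (k : Int) 1).foldl
          (fun (st : List Int × List Int) y =>
            (st.2, (PySem.List.pyRange 0 w 1).map (fun x => stepB B w y x st.1)))
          ([], [])).2 = rowTab B w ((k : Int) - 1)) := by
    intro k
    induction k with
    | zero => exact ⟨by omega, by omega⟩
    | succ n ih =>
      have hc : ((n + 1 : Nat) : Int) = (n : Int) + 1 := by push_cast; ring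
      rw [hc, PySem.List.pyRange_one_succ_right (by positivity), List.foldl_append]
      simp only [List.foldl_cons, List.foldl_nil]
      have hrow : ((PySem.List.pyRange 0 w 1).map (fun x => stepB B w (n : Int) x
          (((PySem.List.pyRange 0 (n : Int) 1).foldl
            (fun (st : List Int × List Int) y =>
              (st.2, (PySem.List.pyRange 0 w 1).map (fun x => stepB B w y x st.1)))
            ([], [])).1))) = rowTab B w (n : Int) := by
        rw [rowTab]
        apply List.map_congr_left
        intro z _
        apply stepB_eq_chain
        intro h2 ox hx0 hx1
        rw [ih.1 (by omega), rowTab_get _ _ _ _ hx0 hx1]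
      refine ⟨fun h2 => ?_, fun _ => ?_⟩
      · show (((PySem.List.pyRange 0 (n : Int) 1).foldl
            (fun (st : List Int × List Int) y =>
              (st.2, (PySem.List.pyRange 0 w 1).map (fun x => stepB B w y x st.1)))
            ([], [])).2) = _
        rw [ih.2 (by omega)]
        congr 1
        omega
      · show ((PySem.List.pyRange 0 w 1).map (fun x => stepB B w (n : Int) x
            (((PySem.List.pyRange 0 (n : Int) 1).foldl
              (fun (st : List Int × List Int) y =>
                (st.2, (PySem.List.pyRange 0 w 1).map (fun x => stepB B w y x st.1)))
              ([], [])).1))) = _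
        rw [hrow]
        congr 1
        omega
  rcases Nat.lt_or_ge k 2 with hk | hk
  · apply stepB_eq_chain
    intro h2
    exfalso
    omega
  · apply stepB_eq_chain
    intro _ ox hx0 hx1
    rw [fillB, (H k).1 hk, rowTab_get _ _ _ _ hx0 hx1]

-- ===== A-side: the BFS computes the same chain values =====
def gval (B : List String) (w : Int) (c : Int × Int × Int) : Int :=
  c.2.2 + chain B w c.2.1 c.1

lemma cell_some_lt {B : List String} {y x : Int} {c : Char}
    (h : cell B y x = some c) : y < (B.length : Int) := by
  unfold cell at h
  rcases hg : PySem.List.pyGet? B y with _ | r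
  · rw [hg] at h; cases h
  · have : ¬ PySem.List.pyGet? B y = none := by rw [hg]; simp
    rw [PySem.List.pyGet?_eq_none_iff] at this
    push_neg at this
    simp only [PySem.Raise.InRange] at this
    omega

lemma child_some_of_cond {B : List String} {w x y l dx : Int}
    (hc : condB B w y x dx = true) :
    childA B (B.length : Int) w x y l (-1) dx = some (x + 2 * dx, y - 2, l + 1) := by
  simp only [condB, Bool.and_eq_true, decide_eq_true_eq, beq_iff_eq,
    Bool.not_eq_eq_eq_not, Bool.not_true, beq_eq_false_iff_ne, ne_eq] at hc
  obtain ⟨⟨⟨⟨⟨⟨⟨hA, hB⟩, hC⟩, hD⟩, hE⟩, hF⟩, hG⟩, hH⟩ := hc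
  have hlen : y - 1 < (B.length : Int) := cell_some_lt hD
  unfold childA
  dsimp only
  rw [if_neg (by push_neg; refine ⟨by omega, by omega, by omega, by omega⟩)]
  rw [if_neg (by
    simp only [ne_eq, not_not]
    have e : y + -1 = y - 1 := by ring
    rw [e]; exact hD)]
  rw [if_neg (by push_neg; refine ⟨by omega, by omega, by omega, by omega⟩)]
  rw [if_neg (by
    have e1 : y + -1 + -1 = y - 2 := by ring
    have e2 : x + dx + dx = x + 2 * dx := by ring
    rw [e1, e2]; exact hH)]
  congr 1
  refine Prod.ext ?_ (Prod.ext ?_ rfl) <;> simp <;> ring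

lemma child_iff (B : List String) (w x y l dx : Int) :
    childA B (B.length : Int) w x y l (-1) dx =
      if condB B w y x dx = true then some (x + 2 * dx, y - 2, l + 1) else none := by
  by_cases hc : condB B w y x dx = true
  · rw [if_pos hc, child_some_of_cond hc]
  · rw [if_neg hc]
    rcases hch : childA B (B.length : Int) w x y l (-1) dx with _ | c
    · rfl
    · exfalso
      apply hc
      unfold childA at hch
      dsimp only at hch
      split_ifs at hch with g1 g2 g3 g4
      push_neg at g1 g3
      rw [not_not] at g2
      simp only [condB, Bool.and_eq_true, decide_eq_true_eq, beq_iff_eq,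
        Bool.not_eq_eq_eq_not, Bool.not_true, beq_eq_false_iff_ne, ne_eq]
      have e1 : y + -1 = y - 1 := by ring
      have e2 : y + -1 + -1 = y - 2 := by ring
      have e3 : x + dx + dx = x + 2 * dx := by ring
      rw [e1] at g2
      rw [e2, e3] at g4
      exact ⟨⟨⟨⟨⟨⟨⟨by omega, by omega⟩, by omega⟩, g2⟩, by omega⟩, by omega⟩, by omega⟩, g4⟩

lemma foldl_gmax_shift (B : List String) (w : Int) (q : List (Int × Int × Int)) (a b : Int) :
    q.foldl (fun acc c => max acc (gval B w c)) (max a b) =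
      max (q.foldl (fun acc c => max acc (gval B w c)) a) b := by
  induction q generalizing a with
  | nil => rfl
  | cons c t ih =>
    simp only [List.foldl_cons]
    rw [max_right_comm, ih]

lemma children_eq (B : List String) (w x y l : Int) :
    [((-1 : Int), (-1 : Int)), ((-1 : Int), (1 : Int))].filterMap
        (fun d => childA B (B.length : Int) w x y l d.1 d.2) =
      ((if condB B w y x (-1) = true then [((x + 2 * (-1), y - 2, l + 1) : Int × Int × Int)] else []) ++
       (if condB B w y x 1 = true then [((x + 2 * 1, y - 2, l + 1) : Int × Int × Int)] else [])) := by
  by_cases h1 : condB B w y x (-1) = true <;> by_cases h2 : condB B w y x 1 = true <;>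
    simp [child_iff, h1, h2]

lemma bfs_foldl (B : List String) (w : Int) :
    ∀ (q : List (Int × Int × Int)) (ans : Int),
      bfsA B (B.length : Int) w q ans =
        q.foldl (fun acc c => max acc (gval B w c)) ans := by
  intro q ans
  induction q, ans using bfsA.induct (B := B) (h := (B.length : Int)) (w := w) with
  | case1 ans => rw [bfsA]; rfl
  | case2 ans x y l rest ih =>
    rw [bfsA]
    rw [ih, List.foldl_append, List.foldl_cons]
    conv_lhs => rw [foldl_gmax_shift]
    conv_rhs => rw [foldl_gmax_shift]
    rw [children_eq]
    by_cases h1 : condB B w y x (-1) = true <;> by_cases h2 : condB B w y x 1 = true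
    · rw [if_pos h1, if_pos h2]
      simp only [List.cons_append, List.nil_append, List.foldl_cons, List.foldl_nil, gval]
      conv_rhs => rw [chain]
      rw [dif_pos h1, dif_pos h2]
      omega
    · rw [if_pos h1, if_neg h2]
      simp only [List.append_nil, List.foldl_cons, List.foldl_nil, gval]
      conv_rhs => rw [chain]
      rw [dif_pos h1, dif_neg h2]
      omega
    · rw [if_neg h1, if_pos h2]
      simp only [List.nil_append, List.foldl_cons, List.foldl_nil, gval]
      conv_rhs => rw [chain]
      rw [dif_neg h1, dif_pos h2]
      omega
    · rw [if_neg h1, if_neg h2]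
      simp only [List.append_nil, List.foldl_nil, gval]
      conv_rhs => rw [chain]
      rw [dif_neg h1, dif_neg h2]
      omega

-- ===== start-position scan: A's nested loop equals B's enumerate/find fold =====
lemma findO_eq (cs : List Char) :
    PySem.Chars.find cs ['O'] = if 'O' ∈ cs then (cs.idxOf 'O' : Int) else -1 := by
  by_cases hm : 'O' ∈ cs
  · rw [if_pos hm]
    have hinf : ['O'] <:+: cs := (List.singleton_infix_iff 'O' cs).2 hm
    have hf : 0 ≤ PySem.Chars.find cs ['O'] := (PySem.Chars.find_nonneg_iff cs ['O']).2 hinf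
    obtain ⟨hpre, hmin⟩ := PySem.Chars.find_spec hf
    set t := (PySem.Chars.find cs ['O']).toNat with ht
    have hget : cs[t]? = some 'O' := by
      obtain ⟨s, hs⟩ := hpre
      have : (cs.drop t)[0]? = some 'O' := by rw [← hs]; rfl
      rwa [List.getElem?_drop, Nat.add_zero] at this
    have htlen : t < cs.length := by
      by_contra hge
      push_neg at hge
      rw [List.getElem?_eq_none hge] at hget
      cases hget
    have hidx : cs.idxOf 'O' = t := by
      apply Nat.le_antisymm
      · by_contra hlt
        push_neg at hlt
        have hlt' : t < cs.findIdx (· == 'O') := hlt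
        have := List.not_of_lt_findIdx hlt'
        rw [List.getElem?_eq_getElem htlen] at hget
        injection hget with hget
        simp at this
        exact this hget
      · by_contra hlt
        push_neg at hlt
        have hil : cs.idxOf 'O' < cs.length := List.idxOf_lt_length_of_mem hm
        apply hmin (cs.idxOf 'O') hlt
        refine ⟨cs.drop (cs.idxOf 'O' + 1), ?_⟩
        have : cs.drop (cs.idxOf 'O') = cs[cs.idxOf 'O'] :: cs.drop (cs.idxOf 'O' + 1) :=
          List.drop_eq_getElem_cons hil
        rw [this, List.getElem_idxOf hil]
        rfl
    rw [hidx]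
    omega
  · rw [if_neg hm]
    rw [PySem.Chars.find_eq_neg_one_iff]
    intro hinf
    exact hm ((List.singleton_infix_iff 'O' cs).1 hinf)

lemma scanRow_eq (cs : List Char) (y : Int) (pos : Int × Int) : ∀ x : Nat,
    scanRowA cs x y pos =
      if 'O' ∈ cs then (((x : Int) + (cs.idxOf 'O' : Int)), y) else pos := by
  induction cs with
  | nil => intro x; simp [scanRowA]
  | cons c t ih =>
    intro x
    by_cases hc : c = 'O'
    · subst hc
      rw [scanRowA, if_pos rfl, if_pos List.mem_cons_self]
      simp [List.idxOf_cons_self]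
    · rw [scanRowA, if_neg hc, ih (x + 1)]
      have hne : c ≠ 'O' := hc
      by_cases hm : 'O' ∈ t
      · rw [if_pos hm, if_pos (List.mem_cons_of_mem _ hm)]
        rw [List.idxOf_cons_ne _ hne]
        congr 1
        push_cast
        ring
      · rw [if_neg hm, if_neg (by
          intro hmem
          rcases List.mem_cons.1 hmem with h | h
          · exact hne h.symm
          · exact hm h)]

lemma scan_eq (rows : List String) : ∀ (s : Int) (pos : Int × Int),
    scanA rows s pos =
      Prod.swap ((PySem.List.enumerate rows s).foldl
        (fun st (p : Int × String) =>
          let i := PySem.Str.find p.2 "O"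
          if i ≠ -1 then (p.1, i) else st) pos.swap) := by
  induction rows with
  | nil => intro s pos; simp [scanA, PySem.List.enumerate_nil]
  | cons r t ih =>
    intro s pos
    rw [scanA, PySem.List.enumerate_cons, List.foldl_cons, ih]
    have hinit : (let i := PySem.Str.find ((s : Int), r).2 "O"
          if i ≠ -1 then (((s : Int), r).1, i) else pos.swap) =
        (scanRowA r.toList 0 s pos).swap := by
      show (if PySem.Str.find r "O" ≠ -1 then ((s : Int), PySem.Str.find r "O") else pos.swap) =
        (scanRowA r.toList 0 s pos).swap
      have hOL : "O".toList = ['O'] := rfl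
      rw [scanRow_eq r.toList s pos 0, PySem.Str.find_eq, hOL, findO_eq]
      by_cases hm : 'O' ∈ r.toList
      · rw [if_pos hm]
        have hge : (0 : Int) ≤ (r.toList.idxOf 'O' : Int) := by positivity
        rw [if_pos (by omega), if_pos hm]
        simp [Prod.swap]
      · rw [if_neg hm]
        rw [if_neg (by simp), if_neg hm]
    rw [hinit]

lemma scan_fst_nonneg (rows : List String) : ∀ (s : Int) (st : Int × Int),
    0 ≤ s → 0 ≤ st.1 →
    0 ≤ ((PySem.List.enumerate rows s).foldl
      (fun st (p : Int × String) =>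
        let i := PySem.Str.find p.2 "O"
        if i ≠ -1 then (p.1, i) else st) st).1 := by
  induction rows with
  | nil => intro s st _ h; simpa [PySem.List.enumerate_nil]
  | cons r t ih =>
    intro s st hs hst
    rw [PySem.List.enumerate_cons, List.foldl_cons]
    refine ih (s + 1) _ (by omega) ?_
    show 0 ≤ (if PySem.Str.find r "O" ≠ -1 then ((s : Int), PySem.Str.find r "O") else st).1
    split_ifs
    · exact hs
    · exact hst

lemma stepB_w_nonpos (B : List String) (w y x : Int) (f : List Int) (hw : w ≤ 0) :
    stepB B w y x f = 0 := by
  have hcf : ∀ dx, condB B w y x dx = false := by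
    intro dx
    by_contra hcc
    rw [Bool.not_eq_false] at hcc
    simp only [condB, Bool.and_eq_true, decide_eq_true_eq] at hcc
    omega
  simp [stepB, List.foldl, hcf]

-- ===== VERDICT (by name: the statement is the Claim_ definition above) =====
theorem solution_spec : Claim_equal_solution := by
  unfold Claim_equal_solution Spec_solution
  intro B _hd _hp
  by_cases hB : B = []
  · subst hB
    rw [solution, solution_alt, if_pos (Or.inl rfl), if_pos rfl]
  · by_cases h0 : (B.headD "") = ""
    · rw [solution, if_pos (Or.inr h0), solution_alt, if_neg hB]
      dsimp only
      rw [h0]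
      rw [stepB_w_nonpos _ _ _ _ _ (by simp)]
    · rw [solution, if_neg (by push_neg; exact ⟨hB, h0⟩), solution_alt, if_neg hB]
      dsimp only
      rw [bfs_foldl, List.foldl_cons, List.foldl_nil, scan_eq B 0 (0, 0)]
      show max 0 (gval B ((B.headD "").toList.length : Int)
          ((scanB B).2, (scanB B).1, 0)) =
        stepB B ((B.headD "").toList.length : Int) (scanB B).1 (scanB B).2
          (fillB B ((B.headD "").toList.length : Int) (scanB B).1)
      have hsy : 0 ≤ (scanB B).1 := by
        rw [scanB]
        exact scan_fst_nonneg B 0 ((0 : Int), (0 : Int)) le_rfl le_rfl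
      rw [show gval B ((B.headD "").toList.length : Int) ((scanB B).2, (scanB B).1, 0) =
        0 + chain B ((B.headD "").toList.length : Int) (scanB B).1 (scanB B).2 from rfl]
      obtain ⟨k, hk⟩ : ∃ k : Nat, (scanB B).1 = (k : Int) := ⟨(scanB B).1.toNat, by omega⟩
      rw [hk, fill_spec B ((B.headD "").toList.length : Int) k (scanB B).2]
      have := chain_nonneg B ((B.headD "").toList.length : Int) (k : Int) (scanB B).2
      omega
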